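-- pv_equiv track=rewrite | github.com/kenken64/examtopics-data-labeler | backend/4upsert_questions.py | parse_answers_from_string
-- ===== SOURCE A (Python) =====
-- def parse_answers_from_string(answers_string):
--     """Parse answers from markdown-style string format to dictionary"""
--     if isinstance(answers_string, dict):
--         return answers_string
--
--     if not isinstance(answers_string, str):
--         return {}
--
--     answers = {}
--     lines = answers_string.strip().split('\n')
--     current_option = None
--     current_text = []
--
--     for line in lines:
--         line = line.strip()
--         if not line:
--             continue
--
--         # Look for pattern like "- A. answer text" or "A. answer text"
--         if line.startswith('- '):
--             line = line[2:]
--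
--         # Find the option letter (A, B, C, D) - handle multiple formats
--         option_key = None
--         option_text = None
--
--         # Check for **A.** format
--         if line.startswith('**') and len(line) > 5 and line[3:6] == '.**':
--             option_key = line[2].upper()
--             option_text = line[6:].strip()
--         # Check for A. format
--         elif len(line) > 1 and line[1] == '.' and line[0].upper() in 'ABCDEF':
--             option_key = line[0].upper()
--             if len(line) > 2:
--                 option_text = line[2:].strip()
--             else:
--                 option_text = ""  # Will be filled by subsequent lines
--
--         # If we found a new option, save the previous one and start collecting the new one
--         if option_key:
--             # Save previous option if exists
--             if current_option and current_text:
--                 text_content = '\n'.join(current_text).strip()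
--                 text_content = text_content.replace('**Most Voted**', '').strip()
--                 answers[current_option] = text_content
--
--             # Start new option
--             current_option = option_key
--             current_text = [option_text] if option_text else []
--         elif current_option:
--             # Continue collecting text for current option
--             current_text.append(line)
--
--     # Don't forget the last option
--     if current_option and current_text:
--         text_content = '\n'.join(current_text).strip()
--         text_content = text_content.replace('**Most Voted**', '').strip()
--         answers[current_option] = text_content
--
--     return answers
-- ===== SOURCE B (Python) =====
-- def _classify(line):
--     """Classify one stripped, de-bulleted line: ('header', key, inline) or ('cont',)."""
--     if line.startswith('**') and len(line) > 5 and line[3:6] == '.**':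
--         return ('header', line[2].upper(), line[6:].strip())
--     if len(line) > 1 and line[1] == '.' and line[0].upper() in 'ABCDEF':
--         return ('header', line[0].upper(), line[2:].strip() if len(line) > 2 else "")
--     return ('cont',)
--
--
-- def _segments(lines, open_seg):
--     """Phase 1: recursively cut the line list into (key, texts) segments."""
--     if not lines:
--         return [open_seg] if open_seg is not None else []
--     line, rest = lines[0], lines[1:]
--     if not line:
--         return _segments(rest, open_seg)
--     if line.startswith('- '):
--         line = line[2:]
--     c = _classify(line)
--     if c[0] == 'header':
--         key, inline = c[1], c[2]
--         prefix = [open_seg] if open_seg is not None else []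
--         return prefix + _segments(rest, (key, [inline] if inline else []))
--     if open_seg is not None:
--         open_seg = (open_seg[0], open_seg[1] + [line])
--     return _segments(rest, open_seg)
--
--
-- def parse_answers_from_string(answers_string):
--     if isinstance(answers_string, dict):
--         return answers_string
--     if not isinstance(answers_string, str):
--         return {}
--     lines = [l.strip() for l in answers_string.strip().split('\n')]
--     answers = {}
--     for key, texts in _segments(lines, None):
--         if texts:
--             answers[key] = '\n'.join(texts).strip().replace('**Most Voted**', '').strip()
--     return answers
-- ===== Notes on version B (the rewrite author's own statement) =====
-- stated objective: alternative
-- what changed: Replaces A's single interleaved loop (mutable current_option/current_text flushed into the dict at each new header and once at the end) with two separate passes: a recursive first pass that cuts the lines into (key, texts) segments, then an independent reduction of the segment list into the dict.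
import Mathlib
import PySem

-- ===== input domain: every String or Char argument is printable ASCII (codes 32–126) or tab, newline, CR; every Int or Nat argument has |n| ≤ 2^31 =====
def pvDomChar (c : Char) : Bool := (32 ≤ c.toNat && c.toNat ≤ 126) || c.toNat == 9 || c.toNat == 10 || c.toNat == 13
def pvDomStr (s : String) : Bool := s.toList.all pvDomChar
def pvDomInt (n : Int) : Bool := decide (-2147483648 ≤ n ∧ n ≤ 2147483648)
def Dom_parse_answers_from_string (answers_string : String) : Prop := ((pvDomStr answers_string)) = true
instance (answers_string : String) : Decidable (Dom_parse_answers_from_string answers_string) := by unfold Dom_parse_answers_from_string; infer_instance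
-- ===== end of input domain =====

-- B re-parses in two passes (cut the lines into (key, texts) segments, then reduce the segments
-- into the dict) instead of A's one interleaved loop; objective: alternative decomposition, same cost.
-- The isinstance branches of A are outside the String input type and are not ported.

-- ===== PORT A =====
-- '\n'.join(texts).strip().replace('**Most Voted**','').strip()  (A runs this code at both flush sites)
def pvClean (texts : List (List Char)) : List Char :=
  PySem.Chars.strip
    (PySem.Chars.replace (PySem.Chars.strip (PySem.Chars.join ['\n'] texts))
      "**Most Voted**".toList [])

-- A's inline option_key/option_text computation: none = no new option found
def pvOptA (line : List Char) : Option (List Char × List Char) :=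
  if PySem.Chars.startswith line ['*','*'] && decide (5 < line.length)
      && (PySem.Chars.slice line (some 3) (some 6) == ['.','*','*']) then
    some ([PySem.Chars.upperChar (PySem.List.pyGetD line 2 ' ')],
          PySem.Chars.strip (PySem.Chars.slice line (some 6) none))
  else if decide (1 < line.length) && (PySem.List.pyGetD line 1 ' ' == '.')
      && PySem.Chars.isIn [PySem.Chars.upperChar (PySem.List.pyGetD line 0 ' ')] "ABCDEF".toList then
    some ([PySem.Chars.upperChar (PySem.List.pyGetD line 0 ' ')],
          if decide (2 < line.length) then PySem.Chars.strip (PySem.Chars.slice line (some 2) none) else [])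
  else
    none

-- A's 'save previous option' block (appears in the loop and once more after it)
def pvFlushA (st : PySem.Dict String String × Option (List Char) × List (List Char)) :
    PySem.Dict String String :=
  match st with
  | (d, some c, ctext) =>
      if ctext ≠ [] then d.insert (String.ofList c) (String.ofList (pvClean ctext)) else d
  | (d, none, _) => d

-- A's loop body over state (answers, current_option, current_text)
def pvStepA (st : PySem.Dict String String × Option (List Char) × List (List Char))
    (rawLine : List Char) : PySem.Dict String String × Option (List Char) × List (List Char) :=
  let line := PySem.Chars.strip rawLine
  if line = [] then st
  else
    let line := if PySem.Chars.startswith line ['-', ' '] then PySem.Chars.slice line (some 2) none else line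
    match pvOptA line with
    | some (k, t) => (pvFlushA st, some k, if t ≠ [] then [t] else [])
    | none =>
      match st with
      | (d, some c, ctext) => (d, some c, ctext ++ [line])
      | (d, none, ctext) => (d, none, ctext)

def parse_answers_from_string (answers_string : String) : List (String × String) :=
  (pvFlushA ((PySem.Chars.splitOn (PySem.Chars.strip answers_string.toList) ['\n']).foldl
      pvStepA (PySem.Dict.empty, none, []))).items

-- ===== PORT B =====
inductive PvTok where
  | header : List Char → List Char → PvTok
  | cont : PvTok
deriving Repr, DecidableEq

-- B's _classify on a stripped, de-bulleted line
def pvClassify (line : List Char) : PvTok :=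
  if PySem.Chars.startswith line ['*','*'] && decide (5 < line.length)
      && (PySem.Chars.slice line (some 3) (some 6) == ['.','*','*']) then
    .header [PySem.Chars.upperChar (PySem.List.pyGetD line 2 ' ')]
            (PySem.Chars.strip (PySem.Chars.slice line (some 6) none))
  else if decide (1 < line.length) && (PySem.List.pyGetD line 1 ' ' == '.')
      && PySem.Chars.isIn [PySem.Chars.upperChar (PySem.List.pyGetD line 0 ' ')] "ABCDEF".toList then
    .header [PySem.Chars.upperChar (PySem.List.pyGetD line 0 ' ')]
            (if decide (2 < line.length) then PySem.Chars.strip (PySem.Chars.slice line (some 2) none) else [])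
  else
    .cont

-- B's _segments: phase 1, recursively cut the (pre-stripped) line list into (key, texts) segments
def pvSegments (lines : List (List Char)) (openSeg : Option (List Char × List (List Char))) :
    List (List Char × List (List Char)) :=
  match lines with
  | [] => openSeg.toList
  | line :: rest =>
    if line = [] then pvSegments rest openSeg
    else
      let line := if PySem.Chars.startswith line ['-', ' '] then PySem.Chars.slice line (some 2) none else line
      match pvClassify line with
      | .header key inline =>
          openSeg.toList ++ pvSegments rest (some (key, if inline ≠ [] then [inline] else []))
      | .cont =>
          pvSegments rest (match openSeg with
            | some (k, ts) => some (k, ts ++ [line])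
            | none => none)

-- B's phase 2: reduce the segments into the dict
def pvReduce (d : PySem.Dict String String) (segs : List (List Char × List (List Char))) :
    PySem.Dict String String :=
  segs.foldl
    (fun d seg =>
      if seg.2 ≠ [] then d.insert (String.ofList seg.1) (String.ofList (pvClean seg.2)) else d) d

def parse_answers_from_string_alt (answers_string : String) : List (String × String) :=
  (pvReduce PySem.Dict.empty
    (pvSegments ((PySem.Chars.splitOn (PySem.Chars.strip answers_string.toList) ['\n']).map
      PySem.Chars.strip) none)).items

-- ===== PRECONDITION & SPEC =====
def Spec_parse_answers_from_string (answers_string : String) (out : List (String × String)) : Prop := out = parse_answers_from_string_alt answers_string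
instance (answers_string : String) (out : List (String × String)) : Decidable (Spec_parse_answers_from_string answers_string out) := by unfold Spec_parse_answers_from_string; infer_instance

-- ===== CLAIM (what is proved, stated in full; the proofs are below) =====
def Claim_equal_parse_answers_from_string : Prop := ∀ (answers_string : String), Dom_parse_answers_from_string answers_string → Spec_parse_answers_from_string answers_string (parse_answers_from_string answers_string)

-- ===== LEMMAS AND PROOFS =====

-- A's inline classification and B's _classify make the same decision on every line
theorem pvOptA_eq (line : List Char) :
    pvOptA line = (match pvClassify line with
      | .header k t => some (k, t)
      | .cont => none) := by
  unfold pvOptA pvClassify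
  split_ifs <;> rfl

theorem pvReduce_append (d : PySem.Dict String String) (xs ys : List (List Char × List (List Char))) :
    pvReduce d (xs ++ ys) = pvReduce (pvReduce d xs) ys := by
  unfold pvReduce; exact List.foldl_append ..

theorem pvReduce_open (d : PySem.Dict String String) (copt : Option (List Char))
    (ctext : List (List Char)) :
    pvReduce d (copt.map (fun k => (k, ctext))).toList = pvFlushA (d, copt, ctext) := by
  cases copt <;> simp [pvReduce, pvFlushA]

-- main invariant: flushing A's loop state equals reducing B's segments started from the same open segment
theorem pvLoop_eq (lines : List (List Char)) (d : PySem.Dict String String)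
    (copt : Option (List Char)) (ctext : List (List Char)) :
    pvFlushA (lines.foldl pvStepA (d, copt, ctext)) =
      pvReduce d (pvSegments (lines.map PySem.Chars.strip) (copt.map (fun k => (k, ctext)))) := by
  induction lines generalizing d copt ctext with
  | nil => simpa [pvSegments] using (pvReduce_open d copt ctext).symm
  | cons line rest ih =>
    simp only [List.map_cons, List.foldl_cons]
    rw [pvSegments]
    by_cases h0 : PySem.Chars.strip line = []
    · rw [show pvStepA (d, copt, ctext) line = (d, copt, ctext) by
        simp only [pvStepA, h0]; rfl]
      rw [if_pos h0]
      exact ih d copt ctext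
    · cases hc : pvClassify (if PySem.Chars.startswith (PySem.Chars.strip line) ['-', ' '] then
          PySem.Chars.slice (PySem.Chars.strip line) (some 2) none else PySem.Chars.strip line) with
      | header key inline =>
        rw [if_neg h0]
        rw [show pvStepA (d, copt, ctext) line =
              (pvFlushA (d, copt, ctext), some key, if inline ≠ [] then [inline] else []) by
          simp only [pvStepA, if_neg h0]
          rw [pvOptA_eq, hc]]
        rw [ih (pvFlushA (d, copt, ctext)) (some key) (if inline ≠ [] then [inline] else [])]
        simp only [hc, Option.map_some, pvReduce_append, pvReduce_open]
      | cont =>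
        rw [if_neg h0]
        cases copt with
        | none =>
          rw [show pvStepA (d, none, ctext) line = (d, none, ctext) by
            simp only [pvStepA, if_neg h0]
            rw [pvOptA_eq, hc]]
          rw [ih d none ctext]
          simp only [hc, Option.map_none]
        | some c =>
          rw [show pvStepA (d, some c, ctext) line =
                (d, some c, ctext ++ [if PySem.Chars.startswith (PySem.Chars.strip line) ['-', ' '] then
                  PySem.Chars.slice (PySem.Chars.strip line) (some 2) none else PySem.Chars.strip line]) by
            simp only [pvStepA, if_neg h0]
            rw [pvOptA_eq, hc]]
          rw [ih d (some c) _]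
          simp only [hc, Option.map_some]

-- ===== VERDICT (by name: the statement is the Claim_ definition above) =====
theorem parse_answers_from_string_spec : Claim_equal_parse_answers_from_string := by
  intro s _
  unfold Spec_parse_answers_from_string parse_answers_from_string parse_answers_from_string_alt
  rw [pvLoop_eq]
  rfl
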